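-- pv_equiv track=rewrite | github.com/W-Hsu/HITsz-timetable | classParser/lexer.py | parse
-- ===== SOURCE A (Python) =====
-- def space_sub(c):
--     if c==' ':
--         return '_'
--     return c
--
-- def parse(raw_str) -> list:
--     if raw_str=="" or raw_str==None:
--         return []
--
--     out = []
--     value = ""
--     status = 0
--     for c in raw_str:
--         if status==0:
--             # read attribute
--             if c=='[':
--                 status = 1
--             # ignore prefix-blanks
--             elif c=='\n' or c==' ':
--                 pass
--             # read classname
--             else:
--                 value = value + space_sub(c)
--                 status = 2
--         elif status==1:
--             # attribute end
--             if c==']':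
--                 out.append(("attr", value))
--                 value = ""
--                 status = 0
--             # continue reading attribute
--             else:
--                 value = value + c
--         elif status==2:
--             # classname end, immediately following attribute
--             if c=='[':
--                 out.append(("class", value))
--                 value = ""
--                 status = 1
--             # classname end, following newline character
--             elif c=='\n':
--                 out.append(("class", value))
--                 value = ""
--                 status = 0
--             # continue reading classname
--             else:
--                 value = value + space_sub(c)
--     return out
-- ===== SOURCE B (Python) =====
-- def parse(raw_str) -> list:
--     if raw_str == "" or raw_str is None:
--         return []
--     out = []
--     i = 0
--     n = len(raw_str)
--     while i < n:
--         c = raw_str[i]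
--         if c == '[':
--             j = raw_str.find(']', i + 1)
--             if j == -1:
--                 break
--             out.append(("attr", raw_str[i + 1:j]))
--             i = j + 1
--         elif c == '\n' or c == ' ':
--             i += 1
--         else:
--             j = i + 1
--             while j < n and raw_str[j] != '[' and raw_str[j] != '\n':
--                 j += 1
--             if j == n:
--                 break
--             out.append(("class", raw_str[i:j].replace(' ', '_')))
--             i = j if raw_str[j] == '[' else j + 1
--     return out
-- ===== Notes on version B (the rewrite author's own statement) =====
-- stated objective: alternative
-- what changed: Replaced A's character-at-a-time 3-state machine (status/value accumulator) with a chunk-based tokenizer that scans ahead to the closing ']' or to the next '['/'\n' and emits whole tokens at once.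
import Mathlib
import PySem

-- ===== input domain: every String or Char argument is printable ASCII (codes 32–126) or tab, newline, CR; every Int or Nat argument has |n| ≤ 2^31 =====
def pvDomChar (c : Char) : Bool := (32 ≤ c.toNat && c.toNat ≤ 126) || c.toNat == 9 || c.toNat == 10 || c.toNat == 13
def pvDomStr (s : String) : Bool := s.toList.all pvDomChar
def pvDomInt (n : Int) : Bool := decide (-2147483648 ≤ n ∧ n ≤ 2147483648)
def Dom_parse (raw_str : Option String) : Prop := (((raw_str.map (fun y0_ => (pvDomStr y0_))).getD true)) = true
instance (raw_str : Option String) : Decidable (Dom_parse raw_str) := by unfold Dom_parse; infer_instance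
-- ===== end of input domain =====

-- B replaces A's per-character 3-state machine with a chunk-based scan-ahead tokenizer
-- (grab whole attribute/classname tokens at once); objective: alternative decomposition, same cost.


-- ===== PORT A =====
def space_sub (c : Char) : Char := if c = ' ' then '_' else c

-- one step of A's state machine; state = (out, value, status) exactly as in A's loop body
def parseStep (st : List (String × String) × List Char × Nat) (c : Char) :
    List (String × String) × List Char × Nat :=
  let (out, value, status) := st
  if status = 0 then
    if c = '[' then (out, value, 1)
    else if c = '\n' ∨ c = ' ' then (out, value, 0)
    else (out, value ++ [space_sub c], 2)
  else if status = 1 then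
    if c = ']' then (out ++ [("attr", String.ofList value)], [], 0)
    else (out, value ++ [c], 1)
  else
    if c = '[' then (out ++ [("class", String.ofList value)], [], 1)
    else if c = '\n' then (out ++ [("class", String.ofList value)], [], 0)
    else (out, value ++ [space_sub c], 2)

def parse (raw_str : Option String) : List (String × String) :=
  match raw_str with
  | none => []
  | some s =>
    if s = "" then []
    else (s.toList.foldl parseStep ([], [], 0)).1

-- ===== PORT B =====
-- B's `raw_str.find(']', i+1)` scan: some (chars before the ']', chars after it), none at EOF
def scanAttr : List Char → Option (List Char × List Char)
  | [] => none
  | c :: rest =>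
    if c = ']' then some ([], rest)
    else match scanAttr rest with
         | none => none
         | some (v, r) => some (c :: v, r)

-- B's inner `while` scan to the next '[' or '\n': some (chars before it, rest).
-- A '[' terminator is left in the rest (B's `i = j`), a '\n' is consumed (B's `i = j + 1`); none at EOF.
def scanClass : List Char → Option (List Char × List Char)
  | [] => none
  | c :: rest =>
    if c = '[' then some ([], c :: rest)
    else if c = '\n' then some ([], rest)
    else match scanClass rest with
         | none => none
         | some (v, r) => some (c :: v, r)

theorem scanAttr_len : ∀ cs v r, scanAttr cs = some (v, r) → r.length < cs.length := by
  intro cs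
  induction cs with
  | nil => intro v r h; simp [scanAttr] at h
  | cons c rest ih =>
    intro v r h
    simp only [scanAttr] at h
    split at h
    · simp only [Option.some.injEq, Prod.mk.injEq] at h
      obtain ⟨-, rfl⟩ := h
      simp
    · cases hrec : scanAttr rest with
      | none => rw [hrec] at h; simp at h
      | some p =>
        obtain ⟨v', r'⟩ := p
        rw [hrec] at h
        simp only [Option.some.injEq, Prod.mk.injEq] at h
        obtain ⟨-, rfl⟩ := h
        have := ih v' r' hrec
        simp only [List.length_cons]
        omega

theorem scanClass_len : ∀ cs v r, scanClass cs = some (v, r) → r.length ≤ cs.length := by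
  intro cs
  induction cs with
  | nil => intro v r h; simp [scanClass] at h
  | cons c rest ih =>
    intro v r h
    simp only [scanClass] at h
    split at h
    · simp only [Option.some.injEq, Prod.mk.injEq] at h
      obtain ⟨-, rfl⟩ := h
      simp
    · split at h
      · simp only [Option.some.injEq, Prod.mk.injEq] at h
        obtain ⟨-, rfl⟩ := h
        simp
      · cases hrec : scanClass rest with
        | none => rw [hrec] at h; simp at h
        | some p =>
          obtain ⟨v', r'⟩ := p
          rw [hrec] at h
          simp only [Option.some.injEq, Prod.mk.injEq] at h
          obtain ⟨-, rfl⟩ := h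
          have := ih v' r' hrec
          simp only [List.length_cons]
          omega

def parseAltLoop : List Char → List (String × String)
  | [] => []
  | c :: rest =>
    if c = '[' then
      match h : scanAttr rest with
      | none => []
      | some (v, r) => ("attr", String.ofList v) :: parseAltLoop r
    else if c = '\n' ∨ c = ' ' then parseAltLoop rest
    else
      match h : scanClass rest with
      | none => []
      | some (v, r) =>
        ("class", String.ofList ((c :: v).map space_sub)) :: parseAltLoop r
termination_by cs => cs.length
decreasing_by
  · exact Nat.lt_succ_of_lt (scanAttr_len rest v r h)
  · simp
  · exact Nat.lt_succ_of_le (scanClass_len rest v r h)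

def parse_alt (raw_str : Option String) : List (String × String) :=
  match raw_str with
  | none => []
  | some s => parseAltLoop s.toList

-- ===== PRECONDITION & SPEC =====
def Spec_parse (raw_str : Option String) (out : List (String × String)) : Prop := out = parse_alt raw_str
instance (raw_str : Option String) (out : List (String × String)) : Decidable (Spec_parse raw_str out) := by unfold Spec_parse; infer_instance

-- ===== CLAIM (what is proved, stated in full; the proofs are below) =====
def Claim_equal_parse : Prop := ∀ (raw_str : Option String), Dom_parse raw_str → Spec_parse raw_str (parse raw_str)

-- ===== LEMMAS AND PROOFS =====

-- evaluation lemmas for one machine step (used only by the proofs below)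
theorem parseStep_mono (out : List (String × String)) (value : List Char) (status : Nat)
    (c : Char) :
    parseStep (out, value, status) c
      = (out ++ (parseStep ([], value, status) c).1,
         (parseStep ([], value, status) c).2.1, (parseStep ([], value, status) c).2.2) := by
  simp only [parseStep]
  split_ifs <;> simp

theorem step0_open (out : List (String × String)) (value : List Char) :
    parseStep (out, value, 0) '[' = (out, value, 1) := by simp [parseStep]
theorem step0_blank (out : List (String × String)) (value : List Char) (c : Char)
    (h : c = '\n' ∨ c = ' ') : parseStep (out, value, 0) c = (out, value, 0) := by
  rcases h with h | h <;> subst h <;> simp [parseStep]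
theorem step0_class (out : List (String × String)) (value : List Char) (c : Char)
    (h1 : c ≠ '[') (h2 : ¬(c = '\n' ∨ c = ' ')) :
    parseStep (out, value, 0) c = (out, value ++ [space_sub c], 2) := by
  simp [parseStep, h1, h2]
theorem step1_close (out : List (String × String)) (value : List Char) :
    parseStep (out, value, 1) ']' = (out ++ [("attr", String.ofList value)], [], 0) := by
  simp [parseStep]
theorem step1_other (out : List (String × String)) (value : List Char) (c : Char)
    (h : c ≠ ']') : parseStep (out, value, 1) c = (out, value ++ [c], 1) := by
  simp [parseStep, h]
theorem step2_open (out : List (String × String)) (value : List Char) :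
    parseStep (out, value, 2) '[' = (out ++ [("class", String.ofList value)], [], 1) := by
  simp [parseStep]
theorem step2_nl (out : List (String × String)) (value : List Char) :
    parseStep (out, value, 2) '\n' = (out ++ [("class", String.ofList value)], [], 0) := by
  simp [parseStep]
theorem step2_other (out : List (String × String)) (value : List Char) (c : Char)
    (h1 : c ≠ '[') (h2 : c ≠ '\n') :
    parseStep (out, value, 2) c = (out, value ++ [space_sub c], 2) := by
  simp [parseStep, h1, h2]

-- the emitted-token list accumulates on the left of the fold state
theorem foldl_out_mono (cs : List Char) (out : List (String × String)) (value : List Char)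
    (status : Nat) :
    (cs.foldl parseStep (out, value, status)).1
      = out ++ (cs.foldl parseStep ([], value, status)).1 := by
  induction cs generalizing out value status with
  | nil => simp
  | cons c rest ih =>
    rcases hp : parseStep ([], value, status) c with ⟨o1, v1, s1⟩
    have hm := parseStep_mono out value status c
    rw [hp] at hm
    simp only [List.foldl_cons, hp, hm]
    conv_rhs => rw [ih]
    rw [ih]
    simp

theorem parseAltLoop_open (rest : List Char) :
    parseAltLoop ('[' :: rest) = match scanAttr rest with
      | none => []
      | some (v, r) => ("attr", String.ofList v) :: parseAltLoop r := by
  rw [parseAltLoop.eq_def]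
  simp only [reduceIte]
  cases scanAttr rest <;> rfl

-- main invariant: the machine's output from each of the three states, vs B's scanners
theorem machine_eq : ∀ n cs, cs.length ≤ n →
    ((cs.foldl parseStep ([], [], 0)).1 = parseAltLoop cs) ∧
    (∀ value, (cs.foldl parseStep ([], value, 1)).1 =
      match scanAttr cs with
      | none => []
      | some (v, r) => ("attr", String.ofList (value ++ v)) :: parseAltLoop r) ∧
    (∀ value, (cs.foldl parseStep ([], value, 2)).1 =
      match scanClass cs with
      | none => []
      | some (v, r) => ("class", String.ofList (value ++ v.map space_sub)) :: parseAltLoop r) := by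
  intro n
  induction n with
  | zero =>
    intro cs h
    have : cs = [] := List.eq_nil_of_length_eq_zero (Nat.le_zero.mp h)
    subst this
    refine ⟨by simp [parseAltLoop], ?_, ?_⟩ <;> intro value <;> simp [scanAttr, scanClass]
  | succ n ih =>
    intro cs h
    cases cs with
    | nil =>
      refine ⟨by simp [parseAltLoop], ?_, ?_⟩ <;> intro value <;> simp [scanAttr, scanClass]
    | cons c rest =>
      have hr : rest.length ≤ n := by simpa using Nat.succ_le_succ_iff.mp h
      obtain ⟨ih0, ih1, ih2⟩ := ih rest hr
      refine ⟨?_, ?_, ?_⟩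
      · -- status 0
        rw [parseAltLoop]
        by_cases h1 : c = '['
        · subst h1
          rw [List.foldl_cons, step0_open, ih1 [], if_pos rfl]
          cases hs : scanAttr rest <;> simp
        · by_cases h2 : c = '\n' ∨ c = ' '
          · rw [List.foldl_cons, step0_blank _ _ _ h2, ih0, if_neg h1, if_pos h2]
          · rw [List.foldl_cons, step0_class _ _ _ h1 h2, List.nil_append, ih2 [space_sub c],
              if_neg h1, if_neg h2]
            cases hs : scanClass rest <;> simp
      · -- status 1
        intro value
        by_cases h1 : c = ']'
        · subst h1
          rw [List.foldl_cons, step1_close, foldl_out_mono, ih0]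
          simp [scanAttr]
        · rw [List.foldl_cons, step1_other _ _ _ h1, ih1 (value ++ [c])]
          simp only [scanAttr, if_neg h1]
          cases hs : scanAttr rest with
          | none => simp
          | some p => obtain ⟨v, r⟩ := p; simp
      · -- status 2
        intro value
        by_cases h1 : c = '['
        · subst h1
          rw [List.foldl_cons, step2_open, foldl_out_mono, ih1 []]
          simp only [scanClass, reduceIte]
          rw [parseAltLoop_open]
          cases hs : scanAttr rest <;> simp
        · by_cases h2 : c = '\n'
          · subst h2
            rw [List.foldl_cons, step2_nl, foldl_out_mono, ih0]
            simp [scanClass, h1]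
          · rw [List.foldl_cons, step2_other _ _ _ h1 h2, ih2 (value ++ [space_sub c])]
            simp only [scanClass, if_neg h1, if_neg h2]
            cases hs : scanClass rest with
            | none => simp
            | some p => obtain ⟨v, r⟩ := p; simp

-- ===== VERDICT (by name: the statement is the Claim_ definition above) =====
theorem parse_spec : Claim_equal_parse := by
  intro raw_str _
  unfold Spec_parse parse parse_alt
  cases raw_str with
  | none => rfl
  | some s =>
    by_cases hs : s = ""
    · subst hs; simp [parseAltLoop]
    · simp only [if_neg hs]
      exact (machine_eq s.toList.length s.toList le_rfl).1
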